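-- pv_equiv track=rewrite | github.com/TypAnna/GruProgDD1331 | Övning2/uppg5Checkboard.py | even_row_string
-- ===== SOURCE A (Python) =====
-- def even_row_string(size):
--     evenRow = ""
--     for col in range(size):
--         if col % 2 == 0:
--             evenRow += "*"
--         else:
--             evenRow += " "
--     return evenRow
-- ===== SOURCE B (Python) =====
-- def even_row_string(size):
--     return ("* " * ((size + 1) // 2))[:size]
-- ===== Notes on version B (the rewrite author's own statement) =====
-- stated objective: faster
-- what changed: Replaces the per-column loop with quadratic string += by one string repetition of the two-char unit '* ' sliced to the requested length.
import Mathlib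
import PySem

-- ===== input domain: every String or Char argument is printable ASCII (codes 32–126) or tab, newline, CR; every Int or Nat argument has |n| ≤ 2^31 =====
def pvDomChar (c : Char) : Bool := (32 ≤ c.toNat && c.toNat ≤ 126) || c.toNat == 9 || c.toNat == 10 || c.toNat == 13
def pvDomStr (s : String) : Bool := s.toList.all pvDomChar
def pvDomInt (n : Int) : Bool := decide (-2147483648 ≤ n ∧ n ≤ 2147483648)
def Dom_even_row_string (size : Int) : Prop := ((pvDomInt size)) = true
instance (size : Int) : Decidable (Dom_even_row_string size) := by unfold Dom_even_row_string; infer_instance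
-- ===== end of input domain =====

-- ===== PORT A =====
-- Port of A: fold over range(size), appending '*' on even columns, ' ' on odd.
def even_row_string (size : Int) : String :=
  String.ofList ((PySem.List.pyRange 0 size 1).foldl
    (fun acc col => if PySem.Int.mod col 2 = 0 then acc ++ ['*'] else acc ++ [' ']) [])

-- ===== PORT B =====
-- Port of B: "* " * ((size+1)//2), then slice [:size].
def even_row_string_alt (size : Int) : String :=
  String.ofList (PySem.List.slice
    (List.flatten (List.replicate (PySem.Int.floordiv (size + 1) 2).toNat ['*', ' ']))
    none (some size))

-- ===== PRECONDITION & SPEC =====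
def Spec_even_row_string (size : Int) (out : String) : Prop := out = even_row_string_alt size
instance (size : Int) (out : String) : Decidable (Spec_even_row_string size out) := by unfold Spec_even_row_string; infer_instance

-- ===== CLAIM (what is proved, stated in full; the proofs are below) =====
def Claim_equal_even_row_string : Prop := ∀ (size : Int), Dom_even_row_string size → Spec_even_row_string size (even_row_string size)

-- ===== LEMMAS AND PROOFS =====

-- ===== VERDICT (by name: the statement is the Claim_ definition above) =====
-- the alternating pattern as a map over range
def altChar (k : Nat) : Char := if k % 2 = 0 then '*' else ' '

lemma flatten_replicate_unit (m : Nat) :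
    List.flatten (List.replicate m ['*', ' ']) = (List.range (2 * m)).map altChar := by
  induction m with
  | zero => simp
  | succ m ih =>
      rw [List.replicate_succ', List.flatten_append, ih]
      have h2 : 2 * (m + 1) = (2 * m + 1) + 1 := by omega
      rw [h2, List.range_succ, List.range_succ]
      simp [altChar, Nat.add_mod, Nat.mul_mod_right]

lemma foldl_alt (n : Nat) (acc : List Char) :
    (PySem.List.pyRange 0 (n : Int) 1).foldl
      (fun acc col => if PySem.Int.mod col 2 = 0 then acc ++ ['*'] else acc ++ [' ']) acc
    = acc ++ (List.range n).map altChar := by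
  induction n generalizing acc with
  | zero => simp [PySem.List.pyRange_one_eq_nil]
  | succ n ih =>
      have h : (((n : Nat) + 1 : Nat) : Int) = (n : Int) + 1 := by push_cast; ring
      rw [h, PySem.List.pyRange_one_succ_right (by positivity), List.foldl_append, ih,
        List.range_succ]
      by_cases hp : n % 2 = 0
      · simp [hp, altChar]
        omega
      · simp [hp, altChar]
        omega

theorem even_row_string_spec : Claim_equal_even_row_string := by
  intro size _
  unfold Spec_even_row_string even_row_string even_row_string_alt
  by_cases h : size ≤ 0
  · have hr : PySem.List.pyRange 0 size 1 = [] := PySem.List.pyRange_one_eq_nil h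
    have hf : PySem.Int.floordiv (size + 1) 2 ≤ 0 := by
      have := PySem.Int.floordiv_eq_iff_of_pos (a := size + 1) (b := 2) (q := PySem.Int.floordiv (size + 1) 2) (by norm_num)
      omega
    have ht : (PySem.Int.floordiv (size + 1) 2).toNat = 0 := by omega
    rw [hr, ht]
    simp [PySem.List.slice]
  · push Not at h
    obtain ⟨n, rfl⟩ : ∃ n : Nat, size = (n : Int) := ⟨size.toNat, by omega⟩
    rw [foldl_alt, PySem.List.slice_to_natCast]
    have hfd : PySem.Int.floordiv ((n : Int) + 1) 2 = (((n + 1) / 2 : Nat) : Int) := by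
      have := PySem.Int.floordiv_eq_iff_of_pos (a := (n : Int) + 1) (b := 2) (q := (((n + 1) / 2 : Nat) : Int)) (by norm_num)
      have h1 : n % 2 < 2 := Nat.mod_lt _ (by norm_num)
      have h2 : 2 * ((n + 1) / 2) + (n + 1) % 2 = n + 1 := by omega
      omega
    rw [hfd, flatten_replicate_unit]
    have ht : ((((n + 1) / 2 : Nat) : Int)).toNat = (n + 1) / 2 := by omega
    rw [ht, ← List.map_take, List.take_range]
    have : min n (2 * ((n + 1) / 2)) = n := by omega
    rw [this]
    simp
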